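-- pv_equiv track=rewrite | github.com/Namyamb/MCP-assistant | app/integrations/sheets/utils.py | detect_data_range
-- ===== SOURCE A (Python) =====
-- def detect_data_range(rows: list) -> tuple[int, int, int, int]:
--     """
--     Find bounding box of non-empty data.
--     Returns (first_data_row, last_data_row, first_col, last_col) — 0-based.
--     """
--     if not rows:
--         return 0, 0, 0, 0
--
--     first_row = 0
--     last_row = len(rows) - 1
--     first_col = 0
--     last_col = 0
--
--     for r, row in enumerate(rows):
--         if any(cell and str(cell).strip() for cell in row):
--             first_row = r
--             break
--
--     for r in range(len(rows) - 1, -1, -1):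
--         if any(cell and str(cell).strip() for cell in rows[r]):
--             last_row = r
--             break
--
--     all_cols = max((len(row) for row in rows), default=0)
--     last_col = all_cols - 1
--
--     return first_row, last_row, first_col, last_col
-- ===== SOURCE B (Python) =====
-- def detect_data_range(rows: list) -> tuple[int, int, int, int]:
--     """
--     Find bounding box of non-empty data.
--     Returns (first_data_row, last_data_row, first_col, last_col) — 0-based.
--     Single forward pass keeping first/last non-empty row and running max width.
--     """
--     first = last = None
--     max_width = 0
--     for r, row in enumerate(rows):
--         if len(row) > max_width:
--             max_width = len(row)
--         if any(cell and str(cell).strip() for cell in row):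
--             if first is None:
--                 first = r
--             last = r
--     if not rows:
--         return 0, 0, 0, 0
--     return (first if first is not None else 0,
--             last if last is not None else len(rows) - 1,
--             0, max_width - 1)
-- ===== Notes on version B (the rewrite author's own statement) =====
-- stated objective: simpler
-- what changed: Replaces A's forward break-scan, separate backward break-scan over a descending range, and separate max-of-widths generator with one forward pass over enumerate(rows) maintaining first/last non-empty row and a running max width.
import Mathlib
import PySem

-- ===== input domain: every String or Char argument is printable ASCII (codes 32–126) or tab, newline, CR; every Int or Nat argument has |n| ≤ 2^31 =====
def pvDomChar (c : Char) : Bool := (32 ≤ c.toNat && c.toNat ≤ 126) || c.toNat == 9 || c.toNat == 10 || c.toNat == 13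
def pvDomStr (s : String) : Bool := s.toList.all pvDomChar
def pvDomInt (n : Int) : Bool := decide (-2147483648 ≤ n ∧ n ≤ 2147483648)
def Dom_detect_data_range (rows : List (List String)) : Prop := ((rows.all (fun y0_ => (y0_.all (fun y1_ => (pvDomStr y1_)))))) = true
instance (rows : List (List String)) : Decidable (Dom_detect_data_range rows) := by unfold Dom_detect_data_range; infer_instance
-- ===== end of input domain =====

-- B replaces A's two directional break-scans plus a separate width maximum by a single
-- forward accumulator pass (objective: simpler).

-- ===== PORT A =====
-- Python truthiness of `cell and str(cell).strip()` for a string cell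
def pvRowNE (row : List String) : Bool :=
  row.any (fun c => !(c == "") && !(PySem.Str.strip c == ""))

-- A's first loop: `for r, row in enumerate(rows): if any(...): first_row = r; break`
def pvFirstLoopA : List (List String) → Int → Int
  | [], _ => 0
  | row :: rest, r => if pvRowNE row then r else pvFirstLoopA rest (r + 1)

-- A's second loop over `range(len(rows)-1, -1, -1)` with break; default last_row = len-1
def pvLastLoopA (rows : List (List String)) : List Int → Int
  | [] => (rows.length : Int) - 1
  | r :: rest =>
      if pvRowNE ((PySem.List.pyGet? rows r).getD []) then r else pvLastLoopA rows rest

def detect_data_range (rows : List (List String)) : Int × Int × Int × Int :=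
  if rows = [] then (0, 0, 0, 0)
  else
    let first_row := pvFirstLoopA rows 0
    let last_row := pvLastLoopA rows (PySem.List.pyRange ((rows.length : Int) - 1) (-1) (-1))
    let all_cols := PySem.List.maxD (rows.map (fun row => (row.length : Int))) (fun x => x) 0
    (first_row, last_row, 0, all_cols - 1)

-- ===== PORT B =====
-- B's single forward pass: state (first non-empty row, last non-empty row, running max width)
def pvScanB : List (List String) → Int → Option Int → Option Int → Int →
    Option Int × Option Int × Int
  | [], _, f, l, m => (f, l, m)
  | row :: rest, r, f, l, m =>
      let m' := if (row.length : Int) > m then (row.length : Int) else m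
      if pvRowNE row then
        pvScanB rest (r + 1) (if f.isNone then some r else f) (some r) m'
      else
        pvScanB rest (r + 1) f l m'

def detect_data_range_alt (rows : List (List String)) : Int × Int × Int × Int :=
  let s := pvScanB rows 0 none none 0
  if rows = [] then (0, 0, 0, 0)
  else (s.1.getD 0, s.2.1.getD ((rows.length : Int) - 1), 0, s.2.2 - 1)

-- ===== PRECONDITION & SPEC =====
def Spec_detect_data_range (rows : List (List String)) (out : Int × Int × Int × Int) : Prop := out = detect_data_range_alt rows
instance (rows : List (List String)) (out : Int × Int × Int × Int) : Decidable (Spec_detect_data_range rows out) := by unfold Spec_detect_data_range; infer_instance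

-- ===== CLAIM (what is proved, stated in full; the proofs are below) =====
def Claim_equal_detect_data_range : Prop := ∀ (rows : List (List String)), Dom_detect_data_range rows → Spec_detect_data_range rows (detect_data_range rows)

-- ===== LEMMAS AND PROOFS =====

-- index (from the front) of the first non-empty row
def pvFirstNE : List (List String) → Option Nat
  | [] => none
  | row :: rest => if pvRowNE row then some 0 else (pvFirstNE rest).map (· + 1)

-- index of the last non-empty row
def pvLastNE : List (List String) → Option Nat
  | [] => none
  | row :: rest =>
      match pvLastNE rest with
      | some i => some (i + 1)
      | none => if pvRowNE row then some 0 else none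

theorem pvFirstLoopA_eq (rows : List (List String)) : ∀ (r : Int),
    pvFirstLoopA rows r = ((pvFirstNE rows).map (fun i => r + (i : Int))).getD 0 := by
  induction rows with
  | nil => intro r; rfl
  | cons row rest ih =>
      intro r
      by_cases h : pvRowNE row = true
      · simp [pvFirstLoopA, pvFirstNE, h]
      · simp only [pvFirstLoopA, pvFirstNE, h, if_neg, Bool.not_eq_true]
        rw [ih (r + 1)]
        cases pvFirstNE rest with
        | none => simp
        | some i => simp; omega

theorem pvScanB_fst (rows : List (List String)) : ∀ (r : Int) (f l : Option Int) (m : Int),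
    (pvScanB rows r f l m).1 = f.or ((pvFirstNE rows).map (fun i => r + (i : Int))) := by
  induction rows with
  | nil => intro r f l m; cases f <;> rfl
  | cons row rest ih =>
      intro r f l m
      by_cases h : pvRowNE row = true
      · simp only [pvScanB, h, if_pos]
        rw [ih]
        cases f <;> simp [pvFirstNE, h]
      · simp only [pvScanB, h, if_neg, Bool.not_eq_true]
        rw [ih]
        cases f with
        | some x => simp
        | none =>
            simp only [Option.none_or, pvFirstNE, h, if_neg, Bool.not_eq_true]
            cases pvFirstNE rest with
            | none => simp
            | some i => simp; omega

theorem pvScanB_last (rows : List (List String)) : ∀ (r : Int) (f l : Option Int) (m : Int),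
    (pvScanB rows r f l m).2.1 = ((pvLastNE rows).map (fun i => r + (i : Int))).or l := by
  induction rows with
  | nil => intro r f l m; cases l <;> rfl
  | cons row rest ih =>
      intro r f l m
      by_cases h : pvRowNE row = true
      · simp only [pvScanB, h, if_pos]
        rw [ih]
        cases hr : pvLastNE rest with
        | none => simp [pvLastNE, hr, h]
        | some i =>
            simp [pvLastNE, hr]
            omega
      · simp only [pvScanB, h, if_neg, Bool.not_eq_true]
        rw [ih]
        cases hr : pvLastNE rest with
        | none => simp [pvLastNE, hr, h]
        | some i =>
            simp [pvLastNE, hr]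
            omega

theorem pvScanB_max (rows : List (List String)) : ∀ (r : Int) (f l : Option Int) (m : Int),
    (pvScanB rows r f l m).2.2
      = rows.foldl (fun m row => if (row.length : Int) > m then (row.length : Int) else m) m := by
  induction rows with
  | nil => intro r f l m; rfl
  | cons row rest ih =>
      intro r f l m
      by_cases h : pvRowNE row = true <;>
        simp only [pvScanB, h, List.foldl, if_pos, Bool.false_eq_true, if_false] <;>
        rw [ih]

theorem pvLastNE_append_singleton (xs : List (List String)) (x : List String) :
    pvLastNE (xs ++ [x]) = if pvRowNE x then some xs.length else pvLastNE xs := by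
  induction xs with
  | nil => by_cases h : pvRowNE x = true <;> simp [pvLastNE, h]
  | cons y ys ih =>
      by_cases h : pvRowNE x = true
      · simp only [List.cons_append, pvLastNE, ih, h, if_pos]
        simp [List.length_cons]
      · simp only [List.cons_append, pvLastNE, ih, h, if_neg, Bool.not_eq_true]

theorem pvLastLoopA_eq (rows : List (List String)) : ∀ (k : Nat), k ≤ rows.length →
    pvLastLoopA rows (PySem.List.pyRange ((k : Int) - 1) (-1) (-1))
      = (((pvLastNE (rows.take k)).map (fun i => (i : Int)))).getD ((rows.length : Int) - 1) := by
  intro k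
  induction k with
  | zero =>
      intro _
      rw [PySem.List.pyRange_neg_one_eq_nil (by norm_num)]
      simp [pvLastLoopA, pvLastNE]
  | succ k ih =>
      intro hk
      have hk' : k < rows.length := by omega
      have hcons : PySem.List.pyRange (((k + 1 : Nat) : Int) - 1) (-1) (-1)
          = (k : Int) :: PySem.List.pyRange ((k : Int) - 1) (-1) (-1) := by
        rw [show ((k + 1 : Nat) : Int) - 1 = (k : Int) by omega]
        exact PySem.List.pyRange_neg_one_cons (by omega)
      rw [hcons]
      have hget : (PySem.List.pyGet? rows (k : Int)).getD [] = rows[k] := by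
        have : PySem.List.pyGet? rows (k : Int) = some rows[k] := by
          simp [PySem.List.pyGet?, PySem.List.pyIdx?, hk']
        simp [this]
      have htake : rows.take (k + 1) = rows.take k ++ [rows[k]] := by
        rw [List.take_add_one]
        simp [List.getElem?_eq_getElem hk']
      rw [pvLastLoopA, hget, htake, pvLastNE_append_singleton]
      by_cases h : pvRowNE rows[k] = true
      · simp [h, List.length_take, Nat.min_eq_left (Nat.le_of_lt hk')]
      · simp only [h, Bool.false_eq_true, if_false]
        exact ih (Nat.le_of_lt hk')

theorem pvMax_eq (rows : List (List String)) (h : rows ≠ []) :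
    PySem.List.maxD (rows.map (fun row => (row.length : Int))) (fun x => x) 0
      = rows.foldl (fun m row => if (row.length : Int) > m then (row.length : Int) else m) 0 := by
  have hstep : (fun (m : Int) (row : List String) =>
      if (row.length : Int) > m then (row.length : Int) else m)
      = fun m row => max m (row.length : Int) := by
    funext m row
    by_cases hlt : (row.length : Int) > m
    · simp [hlt, max_eq_right (le_of_lt hlt)]
    · simp [hlt, max_eq_left (not_lt.mp hlt)]
  cases rows with
  | nil => exact absurd rfl h
  | cons row rest =>
      rw [hstep]
      simp only [PySem.List.maxD, List.map_cons, PySem.List.max?_id_cons, Option.getD_some,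
        List.foldl_cons]
      rw [List.foldl_map, max_eq_right (by positivity)]

theorem detect_data_range_eq (rows : List (List String)) :
    detect_data_range rows = detect_data_range_alt rows := by
  by_cases h : rows = []
  · simp [detect_data_range, detect_data_range_alt, h]
  · simp only [detect_data_range, detect_data_range_alt, h, if_neg, not_false_iff]
    have h1 := pvFirstLoopA_eq rows 0
    have h2 := pvLastLoopA_eq rows rows.length (le_refl _)
    have h3 := pvScanB_fst rows 0 none none 0
    have h4 := pvScanB_last rows 0 none none 0
    have h5 := pvScanB_max rows 0 none none 0
    have h6 := pvMax_eq rows h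
    rw [List.take_length] at h2
    refine Prod.ext ?_ (Prod.ext ?_ (Prod.ext rfl ?_))
    · simp only [h1, h3, Option.none_or]
    · simp only [h2, h4, Option.or_none]
      cases pvLastNE rows <;> simp
    · simp only [h5, h6]

-- ===== VERDICT (by name: the statement is the Claim_ definition above) =====
theorem detect_data_range_spec : Claim_equal_detect_data_range := by
  intro rows _
  unfold Spec_detect_data_range
  exact detect_data_range_eq rows
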